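-- pv_equiv track=rewrite | github.com/amadeuppereira/IART_FEUP | Project1/src/logic.py | manhattan_distance_equal_pieces
-- ===== SOURCE A (Python) =====
-- def manhattan_distance_between_points(x1,y1,x2,y2) :
--     return abs(x1 - x2) + abs(y1 - y2)
--
-- def manhattan_distance_equal_pieces(piecesCoords) :
--     totalDistance = 0
--     for i in range(len(piecesCoords)):
--         j = i+1
--         while j < len(piecesCoords) :
--             distance = manhattan_distance_between_points(piecesCoords[i][0], piecesCoords[i][1], piecesCoords[j][0], piecesCoords[j][1])
--             # If the distance between two points is 1 then it means they are adjacent so we ignore their distance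
--             if distance > 1 :
--                 totalDistance = totalDistance + distance
--             j = j+1
--     return totalDistance
-- ===== SOURCE B (Python) =====
-- def _axis_sum(vals):
--     vals = sorted(vals)
--     total = 0
--     prefix = 0
--     k = 0
--     for v in vals:
--         total += k * v - prefix
--         prefix += v
--         k += 1
--     return total
--
-- def manhattan_distance_equal_pieces(piecesCoords):
--     cnt = {}
--     for p in piecesCoords:
--         key = (p[0], p[1])
--         cnt[key] = cnt.get(key, 0) + 1
--     adjacent = 0
--     for p in piecesCoords:
--         adjacent += cnt.get((p[0] + 1, p[1]), 0) + cnt.get((p[0], p[1] + 1), 0)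
--     return (_axis_sum([p[0] for p in piecesCoords])
--             + _axis_sum([p[1] for p in piecesCoords])
--             - adjacent)
-- ===== Notes on version B (the rewrite author's own statement) =====
-- stated objective: faster
-- what changed: Replaces the O(n^2) double loop over pairs by sorting each axis with a prefix-sum scan for the total pairwise Manhattan distance, and a hash-map counter of coordinates to count the adjacent (distance-1) pairs that A skips, subtracting one per such pair.
import Mathlib
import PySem

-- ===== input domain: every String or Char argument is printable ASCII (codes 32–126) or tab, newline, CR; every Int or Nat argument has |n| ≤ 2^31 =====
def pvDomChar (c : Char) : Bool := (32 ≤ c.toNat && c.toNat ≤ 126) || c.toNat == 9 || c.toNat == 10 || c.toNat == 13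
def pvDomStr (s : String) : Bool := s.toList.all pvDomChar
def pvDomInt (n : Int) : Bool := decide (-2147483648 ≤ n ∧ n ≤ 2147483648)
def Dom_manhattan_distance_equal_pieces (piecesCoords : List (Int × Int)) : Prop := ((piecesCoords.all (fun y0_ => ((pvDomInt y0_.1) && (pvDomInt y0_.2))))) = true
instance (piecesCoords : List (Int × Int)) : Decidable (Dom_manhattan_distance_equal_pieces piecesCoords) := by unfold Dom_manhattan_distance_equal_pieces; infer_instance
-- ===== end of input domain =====

-- B replaces A's O(n^2) pair loop by per-axis sort + prefix-sum scans and a coordinate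
-- counter for the distance-1 pairs (objective: faster, asymptotically).

-- ===== PORT A =====
def manhattan_distance_between_points (x1 y1 x2 y2 : Int) : Int :=
  |x1 - x2| + |y1 - y2|

-- the inner 'while j < len(piecesCoords)' loop of A
def pvInnerWhile (l : List (Int × Int)) (pi : Int × Int) (j : Int) (acc : Int) : Int :=
  if _h : j < (l.length : Int) then
    let pj := PySem.List.pyGetD l j (0, 0)
    let distance := manhattan_distance_between_points pi.1 pi.2 pj.1 pj.2
    pvInnerWhile l pi (j + 1) (if distance > 1 then acc + distance else acc)
  else acc
termination_by ((l.length : Int) - j).toNat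
decreasing_by omega

def manhattan_distance_equal_pieces (piecesCoords : List (Int × Int)) : Int :=
  (PySem.List.pyRange 0 (piecesCoords.length : Int) 1).foldl
    (fun totalDistance i =>
      pvInnerWhile piecesCoords (PySem.List.pyGetD piecesCoords i (0, 0)) (i + 1) totalDistance)
    0

-- ===== PORT B =====
def pvAxisSum (vals : List Int) : Int :=
  let s := PySem.List.sorted vals (fun v => v) false
  (s.foldl (fun (st : Int × Int × Int) v =>
      (st.1 + st.2.2 * v - st.2.1, st.2.1 + v, st.2.2 + 1)) (0, 0, 0)).1

def manhattan_distance_equal_pieces_alt (piecesCoords : List (Int × Int)) : Int :=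
  let cnt := piecesCoords.foldl
    (fun d p => d.insert (p.1, p.2) (d.getD (p.1, p.2) 0 + 1)) PySem.Dict.empty
  let adjacent := piecesCoords.foldl
    (fun a p => a + (cnt.getD (p.1 + 1, p.2) 0 + cnt.getD (p.1, p.2 + 1) 0)) 0
  pvAxisSum (piecesCoords.map (fun p => p.1))
    + pvAxisSum (piecesCoords.map (fun p => p.2))
    - adjacent

-- ===== PRECONDITION & SPEC =====
def Spec_manhattan_distance_equal_pieces (piecesCoords : List (Int × Int)) (out : Int) : Prop := out = manhattan_distance_equal_pieces_alt piecesCoords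
instance (piecesCoords : List (Int × Int)) (out : Int) : Decidable (Spec_manhattan_distance_equal_pieces piecesCoords out) := by unfold Spec_manhattan_distance_equal_pieces; infer_instance

-- ===== CLAIM (what is proved, stated in full; the proofs are below) =====
def Claim_equal_manhattan_distance_equal_pieces : Prop := ∀ (piecesCoords : List (Int × Int)), Dom_manhattan_distance_equal_pieces piecesCoords → Spec_manhattan_distance_equal_pieces piecesCoords (manhattan_distance_equal_pieces piecesCoords)

-- ===== LEMMAS AND PROOFS =====

def pairAgg (f : (Int × Int) → (Int × Int) → Int) : List (Int × Int) → Int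
  | [] => 0
  | p :: r => ((r.map (f p)).sum + pairAgg f r)

def gFun (p q : Int × Int) : Int :=
  if manhattan_distance_between_points p.1 p.2 q.1 q.2 > 1 then
    manhattan_distance_between_points p.1 p.2 q.1 q.2
  else 0

theorem pvInnerWhile_eq (l : List (Int × Int)) (pi : Int × Int) :
    ∀ (j : Nat) (acc : Int),
      pvInnerWhile l pi (j : Int) acc = acc + ((l.drop j).map (gFun pi)).sum := by
  suffices H : ∀ (k j : Nat) (acc : Int), l.length - j = k →
      pvInnerWhile l pi (j : Int) acc = acc + ((l.drop j).map (gFun pi)).sum by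
    intro j acc; exact H _ j acc rfl
  intro k
  induction k with
  | zero =>
    intro j acc hj
    have hge : l.length ≤ j := by omega
    rw [pvInnerWhile]
    rw [dif_neg (by exact_mod_cast by omega)]
    rw [List.drop_of_length_le hge]
    simp
  | succ k ih =>
    intro j acc hj
    have hlt : j < l.length := by omega
    rw [pvInnerWhile]
    rw [dif_pos (by exact_mod_cast hlt)]
    have hget : PySem.List.pyGetD l (j : Int) (0, 0) = l[j] := by
      rw [PySem.List.pyGetD_natCast, List.getD_eq_getElem _ _ hlt]
    have hcast : ((j : Int) + 1) = ((j + 1 : Nat) : Int) := by push_cast; ring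
    rw [hget, hcast, ih (j + 1) _ (by omega)]
    rw [List.drop_eq_getElem_cons hlt, List.map_cons, List.sum_cons]
    simp only [gFun]
    split_ifs <;> ring

theorem rangeSum (l : List (Int × Int)) :
    ((List.range l.length).map
        (fun k => ((l.drop (k + 1)).map (gFun (l.getD k (0, 0)))).sum)).sum
      = pairAgg gFun l := by
  induction l with
  | nil => simp [pairAgg]
  | cons p r ih =>
    rw [List.length_cons, List.range_succ_eq_map]
    simp only [List.map_cons, List.map_map, List.sum_cons, Function.comp_def,
      Nat.succ_eq_add_one, List.drop_succ_cons, List.getD_cons_succ, List.getD_cons_zero,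
      List.drop_zero]
    rw [pairAgg]
    rw [← ih]

theorem portA_eq_pairAgg (l : List (Int × Int)) :
    manhattan_distance_equal_pieces l = pairAgg gFun l := by
  unfold manhattan_distance_equal_pieces
  rw [PySem.List.pyRange_zero_natCast, List.foldl_map]
  rw [PySem.List.foldl_congr_mem _ _
      (fun acc (k : Nat) => acc + ((l.drop (k + 1)).map (gFun (l.getD k (0, 0)))).sum) 0
      (by
        intro acc k hk
        have hlt : k < l.length := List.mem_range.mp hk
        have hcast : ((k : Int) + 1) = ((k + 1 : Nat) : Int) := by push_cast; ring
        rw [hcast, pvInnerWhile_eq, PySem.List.pyGetD_natCast])]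
  rw [PySem.List.foldl_add, rangeSum]
  ring

def sAbs : List Int → Int
  | [] => 0
  | x :: r => ((r.map (fun q => |x - q|)).sum + sAbs r)

def sInc : List Int → Int
  | [] => 0
  | x :: r => ((r.map (fun q => q - x)).sum + sInc r)

def dFun (p q : Int × Int) : Int := manhattan_distance_between_points p.1 p.2 q.1 q.2

def aFun (p q : Int × Int) : Int :=
  if manhattan_distance_between_points p.1 p.2 q.1 q.2 = 1 then 1 else 0

theorem sum_map_sub_int {α : Type} (xs : List α) (f g : α → Int) :
    (xs.map (fun x => f x - g x)).sum = (xs.map f).sum - (xs.map g).sum := by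
  induction xs with
  | nil => simp
  | cons x r ih => simp [ih]; ring

theorem gFun_pointwise (p q : Int × Int) : gFun p q = dFun p q - aFun p q := by
  unfold gFun dFun aFun manhattan_distance_between_points
  have h1 : 0 ≤ |p.1 - q.1| := abs_nonneg _
  have h2 : 0 ≤ |p.2 - q.2| := abs_nonneg _
  split_ifs <;> omega

theorem pairAgg_split (l : List (Int × Int)) :
    pairAgg gFun l = pairAgg dFun l - pairAgg aFun l := by
  induction l with
  | nil => simp [pairAgg]
  | cons p r ih =>
    simp only [pairAgg, ih]
    have : r.map (gFun p) = r.map (fun q => dFun p q - aFun p q) :=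
      List.map_congr_left (fun q _ => gFun_pointwise p q)
    rw [this, sum_map_sub_int]
    ring

theorem pairAgg_d_axes (l : List (Int × Int)) :
    pairAgg dFun l = sAbs (l.map (fun p => p.1)) + sAbs (l.map (fun p => p.2)) := by
  induction l with
  | nil => simp [pairAgg, sAbs]
  | cons p r ih =>
    simp only [pairAgg, List.map_cons, sAbs, ih, List.map_map, Function.comp_def]
    have : r.map (dFun p) = r.map (fun q => |p.1 - q.1| + |p.2 - q.2|) := rfl
    rw [this, PySem.List.sum_map_add_int]
    ring

theorem sAbs_perm {l l' : List Int} (h : l.Perm l') : sAbs l = sAbs l' := by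
  induction h with
  | nil => rfl
  | cons x h ih =>
    simp only [sAbs, ih, (h.map (fun q => |x - q|)).sum_eq]
  | swap x y l =>
    simp only [sAbs, List.map_cons, List.sum_cons, abs_sub_comm x y]
    ring
  | trans _ _ ih1 ih2 => rw [ih1, ih2]

def wAux : List Int → Int → Int → Int → Int
  | [], t, _, _ => t
  | v :: r, t, p, k => wAux r (t + k * v - p) (p + v) (k + 1)

theorem fold_eq_wAux (s : List Int) : ∀ (t p k : Int),
    (s.foldl (fun (st : Int × Int × Int) v =>
      (st.1 + st.2.2 * v - st.2.1, st.2.1 + v, st.2.2 + 1)) (t, p, k)).1 = wAux s t p k := by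
  induction s with
  | nil => intro t p k; rfl
  | cons v r ih => intro t p k; simpa [wAux] using ih (t + k * v - p) (p + v) (k + 1)

theorem sum_map_vsub (c : List Int) (v : Int) :
    (c.map (fun q => v - q)).sum = (c.length : Int) * v - c.sum := by
  induction c with
  | nil => simp
  | cons q r ih => simp [ih]; ring

theorem wAux_eq (s : List Int) : ∀ (c : List Int) (t : Int),
    wAux s t c.sum (c.length : Int)
      = t + (s.map (fun v => (c.map (fun q => v - q)).sum)).sum + sInc s := by
  induction s with
  | nil => intro c t; simp [wAux, sInc]
  | cons v r ih =>
    intro c t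
    have h1 : (c.sum + v) = (c ++ [v]).sum := by simp
    have h2 : ((c.length : Int) + 1) = ((c ++ [v]).length : Int) := by simp
    rw [wAux, h1, h2, ih (c ++ [v])]
    simp only [List.map_cons, List.sum_cons, sInc]
    have h3 : r.map (fun w => ((c ++ [v]).map (fun q => w - q)).sum)
        = r.map (fun w => (c.map (fun q => w - q)).sum + (w - v)) := by
      apply List.map_congr_left; intro w _; simp
    rw [h3, PySem.List.sum_map_add_int, sum_map_vsub]
    ring

theorem sInc_eq_sAbs_of_sorted (s : List Int) (h : s.Pairwise (· ≤ ·)) : sInc s = sAbs s := by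
  induction s with
  | nil => rfl
  | cons x r ih =>
    rw [List.pairwise_cons] at h
    simp only [sInc, sAbs, ih h.2]
    congr 1
    apply congrArg
    apply List.map_congr_left
    intro q hq
    have : x ≤ q := h.1 q hq
    rw [abs_of_nonpos (by omega)]
    ring

theorem pvAxisSum_eq (vals : List Int) : pvAxisSum vals = sAbs vals := by
  unfold pvAxisSum
  rw [fold_eq_wAux]
  rw [show wAux (PySem.List.sorted vals (fun v => v) false) 0 0 0
        = wAux (PySem.List.sorted vals (fun v => v) false) 0 ([] : List Int).sum
            ((([] : List Int).length : Int)) by simp]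
  rw [wAux_eq]
  simp only [List.map_nil, List.sum_nil]
  have := sInc_eq_sAbs_of_sorted (PySem.List.sorted vals (fun v => v) false)
    (by simpa using PySem.List.sorted_pairwise vals (fun v => v))
  rw [this]
  have hperm := PySem.List.sorted_perm vals (fun v => v) false
  simp [sAbs_perm hperm]

def nFun (p q : Int × Int) : Int :=
  (if q = (p.1 + 1, p.2) then 1 else 0) + (if q = (p.1, p.2 + 1) then 1 else 0)

theorem aFun_pointwise (p q : Int × Int) : aFun p q = nFun p q + nFun q p := by
  rcases p with ⟨px, py⟩
  rcases q with ⟨qx, qy⟩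
  simp only [aFun, nFun, manhattan_distance_between_points, Prod.mk.injEq]
  rcases abs_cases (px - qx) with ⟨h1, h2⟩ | ⟨h1, h2⟩ <;>
    rcases abs_cases (py - qy) with ⟨h3, h4⟩ | ⟨h3, h4⟩ <;>
      simp only [h1, h3] <;> split_ifs <;> omega

theorem nFun_self (p : Int × Int) : nFun p p = 0 := by
  rcases p with ⟨px, py⟩
  simp only [nFun, Prod.mk.injEq]
  split_ifs <;> omega

theorem pairAgg_congr {f g : (Int × Int) → (Int × Int) → Int}
    (h : ∀ p q, f p q = g p q) (l : List (Int × Int)) : pairAgg f l = pairAgg g l := by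
  have : f = g := funext fun p => funext fun q => h p q
  rw [this]

theorem pairAgg_symm (f : (Int × Int) → (Int × Int) → Int) (hf : ∀ p, f p p = 0)
    (l : List (Int × Int)) :
    pairAgg (fun p q => f p q + f q p) l = (l.map (fun p => (l.map (f p)).sum)).sum := by
  induction l with
  | nil => rfl
  | cons v r ih =>
    simp only [pairAgg, List.map_cons, List.sum_cons, ih]
    rw [PySem.List.sum_map_add_int]
    rw [PySem.List.sum_map_add_int r (fun p => f p v) (fun p => (r.map (f p)).sum), hf v]
    ring

theorem sum_map_indicator (l : List (Int × Int)) (v : Int × Int) :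
    (l.map (fun q => if q = v then (1 : Int) else 0)).sum = (l.count v : Int) := by
  induction l with
  | nil => simp
  | cons x r ih =>
    simp only [List.map_cons, List.sum_cons, ih, List.count_cons, beq_iff_eq]
    split_ifs with h <;> push_cast <;> omega

theorem pairAgg_aFun (l : List (Int × Int)) :
    pairAgg aFun l
      = (l.map (fun p => ((l.count (p.1 + 1, p.2) : Int) + (l.count (p.1, p.2 + 1) : Int)))).sum := by
  rw [pairAgg_congr aFun_pointwise l, pairAgg_symm nFun nFun_self l]
  apply congrArg
  apply List.map_congr_left
  intro p _
  have hm : l.map (nFun p) = l.map (fun q =>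
      (if q = (p.1 + 1, p.2) then (1 : Int) else 0) + (if q = (p.1, p.2 + 1) then 1 else 0)) := rfl
  rw [hm, PySem.List.sum_map_add_int, sum_map_indicator, sum_map_indicator]

theorem adj_eq (l : List (Int × Int)) :
    (l.foldl (fun a p =>
        a + (((l.foldl (fun d p => d.insert (p.1, p.2) (d.getD (p.1, p.2) 0 + 1))
              PySem.Dict.empty).getD (p.1 + 1, p.2) 0)
          + ((l.foldl (fun d p => d.insert (p.1, p.2) (d.getD (p.1, p.2) 0 + 1))
              PySem.Dict.empty).getD (p.1, p.2 + 1) 0))) 0)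
      = pairAgg aFun l := by
  simp only [Prod.mk.eta]
  have hget : ∀ v : Int × Int,
      (l.foldl (fun d p => d.insert p (d.getD p 0 + 1)) PySem.Dict.empty).getD v 0
        = (l.count v : Int) := by
    intro v
    rw [PySem.Dict.getD_foldl_insert_add_one]
    simp
  rw [PySem.List.foldl_congr_mem _ _
      (fun a p => a + ((l.count (p.1 + 1, p.2) : Int) + (l.count (p.1, p.2 + 1) : Int))) 0
      (by intro a p _; rw [hget, hget])]
  rw [PySem.List.foldl_add, pairAgg_aFun]
  ring

-- ===== VERDICT (by name: the statement is the Claim_ definition above) =====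
theorem manhattan_distance_equal_pieces_spec : Claim_equal_manhattan_distance_equal_pieces := by
  intro l _
  unfold Spec_manhattan_distance_equal_pieces manhattan_distance_equal_pieces_alt
  rw [portA_eq_pairAgg, pairAgg_split, pairAgg_d_axes, pvAxisSum_eq, pvAxisSum_eq, ← adj_eq]
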